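-- pv_equiv track=rewrite | github.com/brown9804/CommunicationsEngineeringDesignsHub | Img-Src_and_Channel_Enc/includes/get_source.py | analize_source_data
-- ===== SOURCE A (Python) =====
-- def analize_source_data(dataBase):
-- 	## Data storage
-- 	complete_BinData = []
-- 	pixel_high = []
-- 	pixel_low = []
-- 	## Data counters
-- 	total_bits_counter = 0
-- 	high_bits_counter = 0
-- 	low_bits_counter = 0
-- 	for vector in dataBase:
-- 		for pixel in vector:
-- 			total_bits_counter = total_bits_counter + 1
-- 			if (pixel == 255): #### WHITE
-- 				pixel = 0 ### Pix on low
-- 				complete_BinData.append(pixel)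
-- 				pixel_high.append(pixel)
-- 				##### Counter
-- 				high_bits_counter = high_bits_counter + 1
--
-- 			else:
-- 				pixel = 1 ## Pix on high
-- 				complete_BinData.append(pixel)
-- 				pixel_low.append(pixel)
-- 				##### Counter
-- 				low_bits_counter = low_bits_counter + 1
--
-- 	return complete_BinData, pixel_high, pixel_low, total_bits_counter, low_bits_counter, high_bits_counter
-- ===== SOURCE B (Python) =====
-- def analize_source_data(dataBase):
--     complete_BinData = [0 if pixel == 255 else 1 for vector in dataBase for pixel in vector]
--     high_bits_counter = complete_BinData.count(0)
--     low_bits_counter = complete_BinData.count(1)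
--     total_bits_counter = len(complete_BinData)
--     pixel_high = [0] * high_bits_counter
--     pixel_low = [1] * low_bits_counter
--     return complete_BinData, pixel_high, pixel_low, total_bits_counter, low_bits_counter, high_bits_counter
-- ===== Notes on version B (the rewrite author's own statement) =====
-- stated objective: simpler
-- what changed: Replaces the nested loop that appends to three lists and bumps three counters with one flat binarizing comprehension; the counters come from count()/len() on it and the two homogeneous lists are rebuilt from the counts.
import Mathlib
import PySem

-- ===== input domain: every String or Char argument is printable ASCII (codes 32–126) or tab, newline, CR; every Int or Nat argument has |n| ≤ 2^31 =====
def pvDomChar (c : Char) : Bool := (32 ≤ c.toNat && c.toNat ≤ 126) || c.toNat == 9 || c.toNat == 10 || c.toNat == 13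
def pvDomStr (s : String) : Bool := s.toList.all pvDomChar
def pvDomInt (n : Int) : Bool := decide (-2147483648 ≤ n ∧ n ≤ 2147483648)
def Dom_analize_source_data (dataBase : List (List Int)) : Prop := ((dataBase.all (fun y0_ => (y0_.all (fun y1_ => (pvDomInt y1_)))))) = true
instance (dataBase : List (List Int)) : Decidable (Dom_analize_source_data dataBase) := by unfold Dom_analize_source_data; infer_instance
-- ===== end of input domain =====

-- B replaces A's nested append-and-count loop by one flat binarizing pass, deriving the counters with count/len and rebuilding the two homogeneous lists from the counts (objective: simpler).

-- ===== PORT A =====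
-- A's loop body, named so the port and the lemmas use the identical term
def pvStep (st : List Int × List Int × List Int × Int × Int × Int) (pixel : Int) :
    List Int × List Int × List Int × Int × Int × Int :=
  let (complete, high, low, total, hc, lc) := st
  if pixel == 255 then
    (complete ++ [(0 : Int)], high ++ [(0 : Int)], low, total + 1, hc + 1, lc)
  else
    (complete ++ [(1 : Int)], high, low ++ [(1 : Int)], total + 1, hc, lc + 1)

-- nested loop with three accumulated lists and three counters, step for step
def analize_source_data (dataBase : List (List Int)) : List Int × List Int × List Int × Int × Int × Int :=
  let st := dataBase.foldl (fun st vector => vector.foldl pvStep st)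
    (([] : List Int), ([] : List Int), ([] : List Int), (0 : Int), (0 : Int), (0 : Int))
  (st.1, st.2.1, st.2.2.1, st.2.2.2.1, st.2.2.2.2.2, st.2.2.2.2.1)

-- ===== PORT B =====
-- flat binarizing pass; counters via count/len; homogeneous lists rebuilt from the counts
def analize_source_data_alt (dataBase : List (List Int)) : List Int × List Int × List Int × Int × Int × Int :=
  let complete_BinData := dataBase.flatMap (fun vector => vector.map (fun pixel => if pixel == 255 then (0 : Int) else 1))
  let high_bits_counter := complete_BinData.count 0
  let low_bits_counter := complete_BinData.count 1
  let total_bits_counter := complete_BinData.length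
  (complete_BinData, List.replicate high_bits_counter (0 : Int), List.replicate low_bits_counter (1 : Int),
   (total_bits_counter : Int), (low_bits_counter : Int), (high_bits_counter : Int))

-- ===== PRECONDITION & SPEC =====
def Spec_analize_source_data (dataBase : List (List Int)) (out : List Int × List Int × List Int × Int × Int × Int) : Prop := out = analize_source_data_alt dataBase
instance (dataBase : List (List Int)) (out : List Int × List Int × List Int × Int × Int × Int) : Decidable (Spec_analize_source_data dataBase out) := by unfold Spec_analize_source_data; infer_instance

-- ===== CLAIM (what is proved, stated in full; the proofs are below) =====
def Claim_equal_analize_source_data : Prop := ∀ (dataBase : List (List Int)), Dom_analize_source_data dataBase → Spec_analize_source_data dataBase (analize_source_data dataBase)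

-- ===== LEMMAS AND PROOFS =====

-- the binarization of one pixel list
def pvBin (v : List Int) : List Int := v.map (fun pixel => if pixel == 255 then (0 : Int) else 1)

-- number of white / non-white pixels
def pvW (v : List Int) : Nat := v.countP (fun pixel => pixel == 255)
def pvL (v : List Int) : Nat := v.countP (fun pixel => !(pixel == 255))

-- A's inner loop, as a function of the accumulator and the pixel list
lemma pvInner (v : List Int) : ∀ (c h l : List Int) (t hc lc : Int),
    v.foldl pvStep (c, h, l, t, hc, lc)
    = (c ++ pvBin v, h ++ List.replicate (pvW v) 0, l ++ List.replicate (pvL v) 1,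
       t + v.length, hc + pvW v, lc + pvL v) := by
  induction v with
  | nil => intro c h l t hc lc; simp [pvBin, pvW, pvL]
  | cons p v ih =>
    intro c h l t hc lc
    by_cases hp : p = 255
    · rw [List.foldl_cons, show pvStep (c, h, l, t, hc, lc) p
          = (c ++ [0], h ++ [0], l, t + 1, hc + 1, lc) by simp [pvStep, hp], ih]
      simp only [pvBin, pvW, pvL, List.map_cons, List.countP_cons, hp]
      simp [List.replicate_succ, List.append_assoc]
      omega
    · rw [List.foldl_cons, show pvStep (c, h, l, t, hc, lc) p
          = (c ++ [1], h, l ++ [1], t + 1, hc, lc + 1) by simp [pvStep, hp], ih]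
      simp only [pvBin, pvW, pvL, List.map_cons, List.countP_cons]
      simp [hp, List.replicate_succ, List.append_assoc]
      omega

-- A's nested loop, fully characterized
lemma pvOuter (dataBase : List (List Int)) : ∀ (c h l : List Int) (t hc lc : Int),
    dataBase.foldl (fun st vector => vector.foldl pvStep st) (c, h, l, t, hc, lc)
    = (c ++ pvBin dataBase.flatten, h ++ List.replicate (pvW dataBase.flatten) 0,
       l ++ List.replicate (pvL dataBase.flatten) 1,
       t + dataBase.flatten.length, hc + pvW dataBase.flatten, lc + pvL dataBase.flatten) := by
  induction dataBase with
  | nil => intro c h l t hc lc; simp [pvBin, pvW, pvL]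
  | cons v vs ih =>
    intro c h l t hc lc
    rw [List.foldl_cons, pvInner, ih]
    simp only [pvBin, pvW, pvL, List.flatten_cons, List.map_append, List.countP_append,
      List.length_append]
    simp [List.append_assoc]
    constructor <;> [omega; constructor <;> omega]

-- counting 0s / 1s in a binarized list counts white / non-white pixels
lemma pvCount0 (v : List Int) : (pvBin v).count 0 = pvW v := by
  induction v with
  | nil => rfl
  | cons p v ih =>
    have ih' := ih
    simp only [pvBin, pvW, beq_iff_eq] at ih'
    by_cases hp : p = 255 <;>
      simp [pvBin, pvW, hp, ih']

lemma pvCount1 (v : List Int) : (pvBin v).count 1 = pvL v := by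
  induction v with
  | nil => rfl
  | cons p v ih =>
    have ih' := ih
    simp only [pvBin, pvL, beq_iff_eq] at ih'
    by_cases hp : p = 255 <;>
      simp [pvBin, pvL, hp, ih']

lemma pvLenBin (v : List Int) : (pvBin v).length = v.length := by
  simp [pvBin]

-- ===== VERDICT (by name: the statement is the Claim_ definition above) =====
theorem analize_source_data_spec : Claim_equal_analize_source_data := by
  unfold Claim_equal_analize_source_data
  intro dataBase _
  unfold Spec_analize_source_data analize_source_data analize_source_data_alt
  rw [pvOuter]
  have hflat : dataBase.flatMap (fun vector => vector.map (fun pixel => if pixel == 255 then (0 : Int) else 1))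
      = pvBin dataBase.flatten := by
    simp [pvBin, List.map_flatten, List.flatMap_def]
  simp only [hflat, pvCount0, pvCount1, pvLenBin]
  simp
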